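-- pv_equiv track=rewrite | github.com/cometsmarsblackberry/summon | app/services/competitive_configs.py | group_for_ui
-- ===== SOURCE A (Python) =====
-- ALLOWED_PREFIXES = ("rgl_", "etf2l_", "fbtf_", "tfarena_", "ultitrio_", "ozfortress_", "cltf2_")
--
-- _SKIP_SUFFIXES = ("_base", "_custom", "_common")
--
-- _FORMAT_MAP: list[tuple[str, str, str]] = [
--     ("rgl_6s_", "RGL", "6v6"),
--     ("rgl_7s_", "RGL", "Prolander"),
--     ("rgl_HL_", "RGL", "Highlander"),
--     ("rgl_mm_", "RGL", "No Restriction"),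
--     ("rgl_ud_", "RGL", "Ultiduo"),
--     ("rgl_pt_", "RGL", "Pass Time"),
--     ("etf2l_6v6_", "ETF2L", "6v6"),
--     ("etf2l_9v9_", "ETF2L", "Highlander"),
--     ("fbtf_6v6_", "FBTF", "6v6"),
--     ("tfarena_6v6_", "TFArena", "6v6"),
--     # Fallback for other tfarena configs
--     ("tfarena_", "TFArena", "Other"),
--     ("ultitrio_", "Ultitrio", "Other"),
--     ("ozfortress_4v4_", "ozfortress", "4v4"),
--     ("ozfortress_6v6_", "ozfortress", "6v6"),
--     ("ozfortress_hl_", "ozfortress", "Highlander"),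
--     ("ozfortress_", "ozfortress", "Other"),
--     ("cltf2_4s_", "CLTF2", "4v4"),
--     ("cltf2_", "CLTF2", "Other"),
--     # Fallback single-prefix entries for configs like etf2l_ultiduo
--     ("etf2l_", "ETF2L", "Other"),
--     ("fbtf_", "FBTF", "Other"),
--     ("rgl_", "RGL", "Other"),
-- ]
--
-- _BASE_STEMS = {prefix.rstrip("_") for prefix, _, _ in _FORMAT_MAP}
--
-- def classify_config(cfg_file: str) -> tuple[str, str]:
--     for prefix, league, fmt in _FORMAT_MAP:
--         if cfg_file.startswith(prefix):
--             return league, fmt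
--     return "Other", "Other"
--
-- def filter_user_selectable(cfg_files: list[str]) -> list[str]:
--     """Filter raw cfg identifiers to those we want to expose in the UI."""
--     out: list[str] = []
--     for stem in cfg_files:
--         if not stem.startswith(ALLOWED_PREFIXES):
--             continue
--         if stem.endswith(_SKIP_SUFFIXES):
--             continue
--         if stem in _BASE_STEMS:
--             continue
--         if stem == "summon_reset":
--             # Shown as a dedicated Reset button
--             continue
--         out.append(stem)
--     return sorted(set(out))
--
-- def group_for_ui(cfg_files: list[str]) -> dict[str, dict[str, list[dict]]]:
--     """Return configs grouped by league -> format for API/UI consumption."""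
--     grouped: dict[str, dict[str, list[dict]]] = {}
--     for cfg_file in filter_user_selectable(cfg_files):
--         league, fmt = classify_config(cfg_file)
--         league_bucket = grouped.setdefault(league, {})
--         fmt_bucket = league_bucket.setdefault(fmt, [])
--         fmt_bucket.append({"cfg_file": cfg_file, "name": cfg_file})
--     return grouped
-- ===== SOURCE B (Python) =====
-- ALLOWED_PREFIXES = ("rgl_", "etf2l_", "fbtf_", "tfarena_", "ultitrio_", "ozfortress_", "cltf2_")
--
-- _SKIP_SUFFIXES = ("_base", "_custom", "_common")
--
-- _FORMAT_MAP = [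
--     ("rgl_6s_", "RGL", "6v6"),
--     ("rgl_7s_", "RGL", "Prolander"),
--     ("rgl_HL_", "RGL", "Highlander"),
--     ("rgl_mm_", "RGL", "No Restriction"),
--     ("rgl_ud_", "RGL", "Ultiduo"),
--     ("rgl_pt_", "RGL", "Pass Time"),
--     ("etf2l_6v6_", "ETF2L", "6v6"),
--     ("etf2l_9v9_", "ETF2L", "Highlander"),
--     ("fbtf_6v6_", "FBTF", "6v6"),
--     ("tfarena_6v6_", "TFArena", "6v6"),
--     ("tfarena_", "TFArena", "Other"),
--     ("ultitrio_", "Ultitrio", "Other"),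
--     ("ozfortress_4v4_", "ozfortress", "4v4"),
--     ("ozfortress_6v6_", "ozfortress", "6v6"),
--     ("ozfortress_hl_", "ozfortress", "Highlander"),
--     ("ozfortress_", "ozfortress", "Other"),
--     ("cltf2_4s_", "CLTF2", "4v4"),
--     ("cltf2_", "CLTF2", "Other"),
--     ("etf2l_", "ETF2L", "Other"),
--     ("fbtf_", "FBTF", "Other"),
--     ("rgl_", "RGL", "Other"),
-- ]
--
-- _BASE_STEMS = {prefix.rstrip("_") for prefix, _, _ in _FORMAT_MAP}
--
--
-- def classify_config(cfg_file):
--     for prefix, league, fmt in _FORMAT_MAP: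
--         if cfg_file.startswith(prefix):
--             return league, fmt
--     return "Other", "Other"
--
--
-- def _selectable(stem):
--     return (stem.startswith(ALLOWED_PREFIXES)
--             and not stem.endswith(_SKIP_SUFFIXES)
--             and stem not in _BASE_STEMS
--             and stem != "summon_reset")
--
--
-- def group_for_ui(cfg_files):
--     """Declarative group-by: tag each selectable config once, then build the
--     nested mapping with ordered-dedup + filter comprehensions."""
--     items = sorted({s for s in cfg_files if _selectable(s)})
--     tagged = [(classify_config(s), s) for s in items]
--     leagues = list(dict.fromkeys(lg for (lg, _), _ in tagged))
--     return {
--         lg: {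
--             fm: [{"cfg_file": s, "name": s}
--                  for (l2, f2), s in tagged if l2 == lg and f2 == fm]
--             for fm in dict.fromkeys(f2 for (l2, f2), _ in tagged if l2 == lg)
--         }
--         for lg in leagues
--     }
-- ===== Notes on version B (the rewrite author's own statement) =====
-- stated objective: alternative
-- what changed: A builds the nested league->format mapping imperatively in one pass with chained dict.setdefault mutation; B instead tags each selectable config once and constructs the grouping declaratively, computing the key lists by ordered dedup (dict.fromkeys) and each bucket by a filter comprehension.
import Mathlib
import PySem

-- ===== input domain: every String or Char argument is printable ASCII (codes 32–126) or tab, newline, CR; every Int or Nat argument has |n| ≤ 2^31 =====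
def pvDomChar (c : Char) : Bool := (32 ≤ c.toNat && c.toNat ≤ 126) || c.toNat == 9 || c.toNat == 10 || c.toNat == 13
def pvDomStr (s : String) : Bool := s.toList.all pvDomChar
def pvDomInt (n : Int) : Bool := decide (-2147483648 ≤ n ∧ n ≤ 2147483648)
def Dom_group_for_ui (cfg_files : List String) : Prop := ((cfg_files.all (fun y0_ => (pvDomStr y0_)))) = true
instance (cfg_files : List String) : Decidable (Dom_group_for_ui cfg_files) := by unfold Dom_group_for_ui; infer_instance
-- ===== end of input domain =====

-- B replaces A's imperative setdefault-mutation grouping pass by a declarative group-by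
-- (ordered dedup of keys + a filter per bucket); alternative decomposition, similar cost.


-- ===== PORT A =====
def pvAllowedPrefixes : List String := ["rgl_", "etf2l_", "fbtf_", "tfarena_", "ultitrio_", "ozfortress_", "cltf2_"]

def pvSkipSuffixes : List String := ["_base", "_custom", "_common"]

def pvFormatMap : List (String × String × String) :=
  [("rgl_6s_", "RGL", "6v6"),
   ("rgl_7s_", "RGL", "Prolander"),
   ("rgl_HL_", "RGL", "Highlander"),
   ("rgl_mm_", "RGL", "No Restriction"),
   ("rgl_ud_", "RGL", "Ultiduo"),
   ("rgl_pt_", "RGL", "Pass Time"),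
   ("etf2l_6v6_", "ETF2L", "6v6"),
   ("etf2l_9v9_", "ETF2L", "Highlander"),
   ("fbtf_6v6_", "FBTF", "6v6"),
   ("tfarena_6v6_", "TFArena", "6v6"),
   ("tfarena_", "TFArena", "Other"),
   ("ultitrio_", "Ultitrio", "Other"),
   ("ozfortress_4v4_", "ozfortress", "4v4"),
   ("ozfortress_6v6_", "ozfortress", "6v6"),
   ("ozfortress_hl_", "ozfortress", "Highlander"),
   ("ozfortress_", "ozfortress", "Other"),
   ("cltf2_4s_", "CLTF2", "4v4"),
   ("cltf2_", "CLTF2", "Other"),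
   ("etf2l_", "ETF2L", "Other"),
   ("fbtf_", "FBTF", "Other"),
   ("rgl_", "RGL", "Other")]

-- prefix.rstrip("_"): drop all trailing '_' characters (hand port; exact for str.rstrip("_"))
def pvRstripU (s : String) : String := String.ofList ((s.toList.reverse.dropWhile (fun c => c == '_')).reverse)

def pvBaseStems : PySem.Set String := PySem.Set.ofList (pvFormatMap.map (fun t => pvRstripU t.1))

-- the 'for prefix, league, fmt in _FORMAT_MAP: if startswith: return' loop, with early return
def pvClassifyAux : List (String × String × String) → String → String × String
  | [], _ => ("Other", "Other")
  | (p, lg, fm) :: rest, cfg =>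
      if PySem.Str.startswith cfg p then (lg, fm) else pvClassifyAux rest cfg

def classify_config (cfg_file : String) : String × String := pvClassifyAux pvFormatMap cfg_file

def filter_user_selectable (cfg_files : List String) : List String :=
  let out := cfg_files.foldl (fun out stem =>
    if !(pvAllowedPrefixes.any (fun p => PySem.Str.startswith stem p)) then out
    else if pvSkipSuffixes.any (fun suf => PySem.Str.endswith stem suf) then out
    else if PySem.Set.contains pvBaseStems stem then out
    else if stem == "summon_reset" then out
    else out ++ [stem]) []
  PySem.List.sorted (PySem.Set.ofList out) (fun x => x)

-- 'setdefault' is ported as read-with-default (getD) plus write-back (insert): identical final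
-- dict (overwrite keeps position, new keys append), since Python mutates the bucket in place.
def group_for_ui (cfg_files : List String) : List (String × List (String × List (List (String × String)))) :=
  let grouped : PySem.Dict String (PySem.Dict String (List (List (String × String)))) :=
    (filter_user_selectable cfg_files).foldl (fun grouped cfg_file =>
      let lf := classify_config cfg_file
      let league_bucket := grouped.getD lf.1 PySem.Dict.empty
      let fmt_bucket := league_bucket.getD lf.2 []
      grouped.insert lf.1 (league_bucket.insert lf.2
        (fmt_bucket ++ [[("cfg_file", cfg_file), ("name", cfg_file)]]))) PySem.Dict.empty
  grouped.items.map (fun p => (p.1, p.2.items))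

-- ===== PORT B =====
def pvSelectable (stem : String) : Bool :=
  (pvAllowedPrefixes.any (fun p => PySem.Str.startswith stem p)) &&
  !(pvSkipSuffixes.any (fun suf => PySem.Str.endswith stem suf)) &&
  !(PySem.Set.contains pvBaseStems stem) &&
  !(stem == "summon_reset")

def pvEntry (s : String) : List (String × String) := [("cfg_file", s), ("name", s)]

def group_for_ui_alt (cfg_files : List String) : List (String × List (String × List (List (String × String)))) :=
  let items := PySem.List.sorted (PySem.Set.ofList (cfg_files.filter pvSelectable)) (fun x => x)
  let tagged := items.map (fun s => (classify_config s, s))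
  let leagues := PySem.List.dedup (tagged.map (fun t => t.1.1))
  leagues.map (fun lg =>
    (lg, (PySem.List.dedup ((tagged.filter (fun t => t.1.1 == lg)).map (fun t => t.1.2))).map (fun fm =>
      (fm, (tagged.filter (fun t => t.1.1 == lg && t.1.2 == fm)).map (fun t => pvEntry t.2)))))

-- ===== PRECONDITION & SPEC =====
def Spec_group_for_ui (cfg_files : List String) (out : List (String × List (String × List (List (String × String))))) : Prop := out = group_for_ui_alt cfg_files
instance (cfg_files : List String) (out : List (String × List (String × List (List (String × String))))) : Decidable (Spec_group_for_ui cfg_files out) := by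
  unfold Spec_group_for_ui
  exact @decEq _ (@instDecidableEqList _ (@instDecidableEqProd _ _ instDecidableEqString
    (@instDecidableEqList _ (@instDecidableEqProd _ _ instDecidableEqString
      (@instDecidableEqList _ (@instDecidableEqList _
        (@instDecidableEqProd _ _ instDecidableEqString instDecidableEqString)))))))
    out (group_for_ui_alt cfg_files)

-- ===== CLAIM (what is proved, stated in full; the proofs are below) =====
def Claim_equal_group_for_ui : Prop := ∀ (cfg_files : List String), Dom_group_for_ui cfg_files → Spec_group_for_ui cfg_files (group_for_ui cfg_files)

-- ===== LEMMAS AND PROOFS =====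

-- A's filter-loop body, collapsed to a single conditional append on pvSelectable
theorem pv_stepA_eq (out : List String) (stem : String) :
    (if !(pvAllowedPrefixes.any (fun p => PySem.Str.startswith stem p)) then out
     else if pvSkipSuffixes.any (fun suf => PySem.Str.endswith stem suf) then out
     else if PySem.Set.contains pvBaseStems stem then out
     else if stem == "summon_reset" then out
     else out ++ [stem])
    = (if pvSelectable stem then out ++ [stem] else out) := by
  unfold pvSelectable
  cases pvAllowedPrefixes.any (fun p => PySem.Str.startswith stem p) <;>
    cases pvSkipSuffixes.any (fun suf => PySem.Str.endswith stem suf) <;>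
      cases PySem.Set.contains pvBaseStems stem <;>
        cases stem == "summon_reset" <;> simp

-- A's filter_user_selectable is sorted(set(filter(pvSelectable, ...)))
theorem pv_filter_eq (cfg_files : List String) :
    filter_user_selectable cfg_files
      = PySem.List.sorted (PySem.Set.ofList (cfg_files.filter pvSelectable)) (fun x => x) := by
  unfold filter_user_selectable
  have h : cfg_files.foldl (fun out stem =>
      if !(pvAllowedPrefixes.any (fun p => PySem.Str.startswith stem p)) then out
      else if pvSkipSuffixes.any (fun suf => PySem.Str.endswith stem suf) then out
      else if PySem.Set.contains pvBaseStems stem then out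
      else if stem == "summon_reset" then out
      else out ++ [stem]) []
      = cfg_files.filter pvSelectable := by
    rw [PySem.List.foldl_congr_mem _ _ _ _ (fun acc x _ => pv_stepA_eq acc x)]
    simpa using PySem.List.foldl_append_if_eq_filter pvSelectable cfg_files []
  rw [h]

-- getD of an insert-with-key grouping fold: only the elements hitting key c matter
theorem pv_getD_foldl_insert_key {α κ ν : Type} [DecidableEq κ] [BEq κ] [LawfulBEq κ]
    (l : List α) (key : α → κ) (d0 : ν) (g : α → ν → ν) (d : PySem.Dict κ ν) (c : κ) :
    (l.foldl (fun d a => d.insert (key a) (g a (d.getD (key a) d0))) d).getD c d0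
      = (l.filter (fun a => key a == c)).foldl (fun v a => g a v) (d.getD c d0) := by
  induction l generalizing d with
  | nil => rfl
  | cons x t ih =>
      simp only [List.foldl_cons, List.filter_cons, ih]
      by_cases hx : key x = c
      · subst hx; simp
      · have hb : (key x == c) = false := by simp [hx]
        simp [hb, PySem.Dict.getD_insert, Ne.symm hx]

-- A's loop body, as a named step function (definitionally equal to the lambda in group_for_ui)
def pvG (a : String) (v : PySem.Dict String (List (List (String × String)))) : PySem.Dict String (List (List (String × String))) :=
  v.insert (classify_config a).2 (v.getD (classify_config a).2 [] ++ [pvEntry a])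

def pvStepA (d : PySem.Dict String (PySem.Dict String (List (List (String × String))))) (a : String) :
    PySem.Dict String (PySem.Dict String (List (List (String × String)))) :=
  d.insert (classify_config a).1 (pvG a (d.getD (classify_config a).1 PySem.Dict.empty))

theorem pv_outer_nodup (l : List String) : ((l.foldl pvStepA PySem.Dict.empty)).keys.Nodup := by
  exact PySem.Dict.nodup_keys_foldl_insert_key l (fun s => (classify_config s).1)
    (fun d x => pvG x (d.getD (classify_config x).1 PySem.Dict.empty)) PySem.Dict.empty
    (by simp [PySem.Dict.keys_empty])

theorem pv_outer_keys (l : List String) :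
    ((l.foldl pvStepA PySem.Dict.empty)).keys = PySem.Set.ofList (l.map (fun s => (classify_config s).1)) := by
  have h := PySem.Dict.keys_foldl_insert_key l (fun s => (classify_config s).1)
      (fun d x => pvG x (d.getD (classify_config x).1 PySem.Dict.empty)) PySem.Dict.empty
  simpa [PySem.Dict.keys_empty, PySem.Set.update_nil_left] using h

theorem pv_inner_nodup (m : List String) : ((m.foldl (fun v a => pvG a v) PySem.Dict.empty)).keys.Nodup := by
  exact PySem.Dict.nodup_keys_foldl_insert_key m (fun s => (classify_config s).2)
    (fun d x => d.getD (classify_config x).2 [] ++ [pvEntry x]) PySem.Dict.empty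
    (by simp [PySem.Dict.keys_empty])

theorem pv_inner_keys (m : List String) :
    ((m.foldl (fun v a => pvG a v) PySem.Dict.empty)).keys = PySem.Set.ofList (m.map (fun s => (classify_config s).2)) := by
  have h := PySem.Dict.keys_foldl_insert_key m (fun s => (classify_config s).2)
      (fun d x => d.getD (classify_config x).2 [] ++ [pvEntry x]) PySem.Dict.empty
  simpa [PySem.Dict.keys_empty, PySem.Set.update_nil_left] using h

-- the heart: A's nested setdefault fold over any item list equals B's declarative group-by
theorem pv_group_eq (l : List String) :
    (l.foldl pvStepA PySem.Dict.empty).items.map (fun p => (p.1, p.2.items))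
    = (PySem.List.dedup ((l.map (fun s => (classify_config s, s))).map (fun t => t.1.1))).map (fun lg =>
        (lg, (PySem.List.dedup (((l.map (fun s => (classify_config s, s))).filter (fun t => t.1.1 == lg)).map (fun t => t.1.2))).map (fun fm =>
          (fm, ((l.map (fun s => (classify_config s, s))).filter (fun t => t.1.1 == lg && t.1.2 == fm)).map (fun t => pvEntry t.2))))) := by
  rw [PySem.Dict.items_eq_map_keys _ (pv_outer_nodup l) PySem.Dict.empty, pv_outer_keys, List.map_map]
  simp only [PySem.List.dedup_eq_ofList, List.map_map, List.filter_map, Function.comp_def]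
  apply List.map_congr_left
  intro lg hlg
  have hin : (l.foldl pvStepA PySem.Dict.empty).getD lg PySem.Dict.empty
      = ((l.filter (fun s => (classify_config s).1 == lg)).foldl (fun v a => pvG a v) PySem.Dict.empty) := by
    have h := pv_getD_foldl_insert_key l (fun s => (classify_config s).1) PySem.Dict.empty pvG PySem.Dict.empty lg
    simpa [PySem.Dict.getD_empty] using h
  simp only [hin]
  refine congrArg (Prod.mk lg) ?_
  rw [PySem.Dict.items_eq_map_keys _ (pv_inner_nodup _) [], pv_inner_keys]
  apply List.map_congr_left
  intro fm hfm
  have hin2 : ((l.filter (fun s => (classify_config s).1 == lg)).foldl (fun v a => pvG a v) PySem.Dict.empty).getD fm []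
      = (((l.filter (fun s => (classify_config s).1 == lg)).filter (fun s => (classify_config s).2 == fm)).map pvEntry) := by
    have h := pv_getD_foldl_insert_key (l.filter (fun s => (classify_config s).1 == lg))
        (fun s => (classify_config s).2) [] (fun a v => v ++ [pvEntry a]) PySem.Dict.empty fm
    rw [PySem.Dict.getD_empty, PySem.List.foldl_append_singleton_eq_map, List.nil_append] at h
    exact h
  simp only [hin2]
  refine congrArg (Prod.mk fm) ?_
  rw [List.filter_filter]
  apply congrArg (List.map pvEntry)
  apply List.filter_congr
  intro s hs
  simp [Bool.and_comm]

-- ===== VERDICT (by name: the statement is the Claim_ definition above) =====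
theorem group_for_ui_spec : Claim_equal_group_for_ui := by
  intro cfg_files _
  show group_for_ui cfg_files = group_for_ui_alt cfg_files
  have e1 : group_for_ui cfg_files
      = ((filter_user_selectable cfg_files).foldl pvStepA PySem.Dict.empty).items.map (fun p => (p.1, p.2.items)) := rfl
  have e2 : group_for_ui_alt cfg_files
      = (fun l => (PySem.List.dedup ((l.map (fun s => (classify_config s, s))).map (fun t => t.1.1))).map (fun lg =>
          (lg, (PySem.List.dedup (((l.map (fun s => (classify_config s, s))).filter (fun t => t.1.1 == lg)).map (fun t => t.1.2))).map (fun fm =>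
            (fm, ((l.map (fun s => (classify_config s, s))).filter (fun t => t.1.1 == lg && t.1.2 == fm)).map (fun t => pvEntry t.2))))))
          (PySem.List.sorted (PySem.Set.ofList (cfg_files.filter pvSelectable)) (fun x => x)) := rfl
  rw [e1, e2, pv_filter_eq]
  exact pv_group_eq _
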